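-- pv_equiv track=rewrite | github.com/qperfect-io/MimiqNotebooks | Strasbourg_quantum_routing/strasbourg_markets_demo/strasbourg_markets_demo/tsp.py | _bitmasks_of_size
-- ===== SOURCE A (Python) =====
-- def _bitmasks_of_size(n: int, size: int, must_include_zero: bool):
--     """Yield bitmasks over `n` items with exactly `size` bits set; optionally
--     require bit 0 to be set."""
--     from itertools import combinations
--     other = range(1, n) if must_include_zero else range(n)
--     base = 1 if must_include_zero else 0
--     pick = size - 1 if must_include_zero else size
--     for combo in combinations(other, pick):
--         mask = base
--         for c in combo:
--             mask |= 1 << c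
--         yield mask
-- ===== SOURCE B (Python) =====
-- def _bitmasks_of_size(n: int, size: int, must_include_zero: bool):
--     """Yield bitmasks over `n` items with exactly `size` bits set; optionally
--     require bit 0 to be set.  Self-contained take-or-skip recursion instead of
--     itertools.combinations; same lexicographic order."""
--     base = 1 if must_include_zero else 0
--     pick = size - 1 if must_include_zero else size
--     positions = list(range(1, n)) if must_include_zero else list(range(n))
--
--     def go(pos, k, mask):
--         if k == 0:
--             yield mask
--         elif 0 < k <= len(pos):  # enough positions left to place k bits
--             yield from go(pos[1:], k - 1, mask | (1 << pos[0]))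
--             yield from go(pos[1:], k, mask)
--
--     yield from go(positions, pick, base)
-- ===== Notes on version B (the rewrite author's own statement) =====
-- stated objective: alternative
-- what changed: Replaces the itertools.combinations call plus per-combination mask-building loop with a self-contained take-or-skip recursion over the candidate bit positions that threads the partial mask, yielding each mask when the required count reaches zero (same lexicographic order).
import Mathlib
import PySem

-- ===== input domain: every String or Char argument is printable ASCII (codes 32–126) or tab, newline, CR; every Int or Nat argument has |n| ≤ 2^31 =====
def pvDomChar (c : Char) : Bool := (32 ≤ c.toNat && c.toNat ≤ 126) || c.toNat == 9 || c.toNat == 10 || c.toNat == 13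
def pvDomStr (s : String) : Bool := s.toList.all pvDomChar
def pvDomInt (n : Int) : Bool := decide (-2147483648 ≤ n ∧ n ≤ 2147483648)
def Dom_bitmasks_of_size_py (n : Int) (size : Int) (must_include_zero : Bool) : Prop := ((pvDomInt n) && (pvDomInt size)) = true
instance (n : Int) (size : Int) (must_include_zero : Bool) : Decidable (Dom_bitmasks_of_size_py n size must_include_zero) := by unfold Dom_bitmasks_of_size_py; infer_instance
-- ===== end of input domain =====

-- B replaces the itertools.combinations call + mask-building loop of A with a take-or-skip
-- recursion over the candidate positions that threads the partial mask (objective: alternative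
-- decomposition, same cost); equivalence is about the list of yielded values.

-- ===== PORT A =====
-- 1 << c for the nonnegative bit positions both ports use (shared so the two ports elaborate it identically)
def pyBit (c : Int) : Int := (1 : Int) <<< c.toNat

-- itertools.combinations(l, k) in lexicographic order (exact for k ≥ 0, the only use inside Pre_)
def pyCombinations (l : List Int) (k : Nat) : List (List Int) :=
  -- itertools.combinations returns no tuples at once when r exceeds len(l)
  if l.length < k then []
  else match k, l with
  | 0, _ => [[]]
  | _ + 1, [] => []
  | k + 1, x :: xs => (pyCombinations xs k).map (fun c => x :: c) ++ pyCombinations xs (k + 1)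

def bitmasks_of_size_py (n : Int) (size : Int) (must_include_zero : Bool) : List Int :=
  let other := if must_include_zero then PySem.List.pyRange 1 n 1 else PySem.List.pyRange 0 n 1
  let base : Int := if must_include_zero then 1 else 0
  let pick : Int := if must_include_zero then size - 1 else size
  -- pick ≥ 0 inside Pre_, so pick.toNat = pick exactly
  (pyCombinations other pick.toNat).map
    (fun combo => combo.foldl (fun mask c => Int.lor mask (pyBit c)) base)

-- ===== PORT B =====
-- go(pos, k, mask): take-or-skip the head position, yielding mask when k hits 0
def altGo (pos : List Int) (k : Int) (mask : Int) : List Int :=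
  if k = 0 then [mask]
  else if 0 < k ∧ k ≤ pos.length then
    match pos with
    | [] => []
    | p :: rest => altGo rest (k - 1) (Int.lor mask (pyBit p)) ++ altGo rest k mask
  else []

def bitmasks_of_size_py_alt (n : Int) (size : Int) (must_include_zero : Bool) : List Int :=
  let base : Int := if must_include_zero then 1 else 0
  let pick : Int := if must_include_zero then size - 1 else size
  let positions := if must_include_zero then PySem.List.pyRange 1 n 1 else PySem.List.pyRange 0 n 1
  altGo positions pick base

-- ===== PRECONDITION & SPEC =====
-- Pre_ excludes exactly the inputs where combinations gets a negative r and A raises ValueError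
def Pre_bitmasks_of_size_py (n : Int) (size : Int) (must_include_zero : Bool) : Prop :=
  0 ≤ (if must_include_zero then size - 1 else size)
instance (n : Int) (size : Int) (must_include_zero : Bool) : Decidable (Pre_bitmasks_of_size_py n size must_include_zero) := by unfold Pre_bitmasks_of_size_py; infer_instance

def pvWitness_bitmasks_of_size_py : Int × Int × Bool := (4, 2, true)

def Spec_bitmasks_of_size_py (n : Int) (size : Int) (must_include_zero : Bool) (out : List Int) : Prop := out = bitmasks_of_size_py_alt n size must_include_zero
instance (n : Int) (size : Int) (must_include_zero : Bool) (out : List Int) : Decidable (Spec_bitmasks_of_size_py n size must_include_zero out) := by unfold Spec_bitmasks_of_size_py; infer_instance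

-- ===== CLAIM (what is proved, stated in full; the proofs are below) =====
def Claim_equal_bitmasks_of_size_py : Prop := ∀ (n : Int) (size : Int) (must_include_zero : Bool), Dom_bitmasks_of_size_py n size must_include_zero → Pre_bitmasks_of_size_py n size must_include_zero → Spec_bitmasks_of_size_py n size must_include_zero (bitmasks_of_size_py n size must_include_zero)

-- ===== LEMMAS AND PROOFS =====

theorem altGo_eq_combinations (pos : List Int) (k : Nat) (mask : Int) :
    altGo pos (k : Int) mask =
      (pyCombinations pos k).map
        (fun combo => combo.foldl (fun m c => Int.lor m (pyBit c)) mask) := by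
  induction pos generalizing k mask with
  | nil =>
    cases k with
    | zero => simp [altGo, pyCombinations]
    | succ k => simp [altGo, pyCombinations]; omega
  | cons p rest ih =>
    cases k with
    | zero => simp [altGo, pyCombinations]
    | succ k =>
      by_cases hlen : rest.length < k
      · have ha : ¬((k + 1 : Nat) : Int) = 0 := by push_cast; omega
        have hb : ¬(0 < ((k + 1 : Nat) : Int) ∧ ((k + 1 : Nat) : Int) ≤ ((p :: rest).length : Int)) := by
          simp only [List.length_cons]; push_cast; omega
        rw [altGo, if_neg ha, if_neg hb]
        have hc : (p :: rest).length < k + 1 := by simp [List.length_cons]; omega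
        rw [pyCombinations, if_pos hc]
        simp
      · have h0 : ¬((k : Int) + 1 = 0) := by omega
        have h1 : (0 : Int) < (k : Int) + 1 ∧ ((k : Int) + 1) ≤ ((p :: rest).length : Int) := by
          simp only [List.length_cons]; push_cast; omega
        rw [show ((k + 1 : Nat) : Int) = (k : Int) + 1 by push_cast; ring]
        rw [altGo, if_neg h0, if_pos h1]
        have hc : ¬(p :: rest).length < k + 1 := by simp [List.length_cons]; omega
        rw [pyCombinations, if_neg hc]
        have hk : ((k : Int) + 1) - 1 = (k : Int) := by ring
        rw [hk, ih, show ((k : Int) + 1) = ((k + 1 : Nat) : Int) by push_cast; ring, ih]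
        simp [Function.comp, List.foldl_cons]

-- ===== VERDICT (by name: the statement is the Claim_ definition above) =====
theorem bitmasks_of_size_py_spec : Claim_equal_bitmasks_of_size_py := by
  intro n size mz _ hpre
  unfold Spec_bitmasks_of_size_py bitmasks_of_size_py bitmasks_of_size_py_alt
  unfold Pre_bitmasks_of_size_py at hpre
  have h : ((if mz then size - 1 else size).toNat : Int) = (if mz then size - 1 else size) :=
    Int.toNat_of_nonneg hpre
  simp only []
  rw [← h, altGo_eq_combinations, Int.toNat_natCast]
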